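-- pv_equiv track=rewrite | github.com/Bandeira-Lab/pep2prob-benchmark | models/resnet/resnet_model.py | get_ion_mask
-- ===== SOURCE A (Python) =====
-- def get_ion_mask(seq_len, charge, max_seq_len):
--     # a2+ ions
--     mask = [True]
--     if charge > 3:
--         charge = 3
--     # b/y ions with charge 1/2/3
--     for ion in range(1, 3):
--         for chr in range(1, 4):
--             if chr > charge:
--                 for seq_idx in range(1, max_seq_len):
--                     mask.append(False)
--             else:
--                 for seq_idx in range(1, max_seq_len):
--                     if seq_idx < seq_len:
--                         mask.append(True)
--                     else:
--                         mask.append(False)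
--     return mask
-- ===== SOURCE B (Python) =====
-- def get_ion_mask(seq_len, charge, max_seq_len):
--     L = max_seq_len - 1
--     n = min(max(charge, 0), 3)
--
--     def bit(k):
--         if k == 0:
--             return True
--         b, p = divmod(k - 1, L)
--         return b % 3 < n and p + 1 < seq_len
--
--     return [bit(k) for k in range(1 + 6 * max(L, 0))]
-- ===== Notes on version B (the rewrite author's own statement) =====
-- stated objective: alternative
-- what changed: Replaces A's nested append loops (ion x charge-level x position with branching) by a closed-form per-index predicate: the mask is a single comprehension over the flat index range, where each index k>0 is decoded via divmod(k-1, max_seq_len-1) into its block number b and position p, and the bit is b%3 < clamp(charge) and p+1 < seq_len.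
import Mathlib
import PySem

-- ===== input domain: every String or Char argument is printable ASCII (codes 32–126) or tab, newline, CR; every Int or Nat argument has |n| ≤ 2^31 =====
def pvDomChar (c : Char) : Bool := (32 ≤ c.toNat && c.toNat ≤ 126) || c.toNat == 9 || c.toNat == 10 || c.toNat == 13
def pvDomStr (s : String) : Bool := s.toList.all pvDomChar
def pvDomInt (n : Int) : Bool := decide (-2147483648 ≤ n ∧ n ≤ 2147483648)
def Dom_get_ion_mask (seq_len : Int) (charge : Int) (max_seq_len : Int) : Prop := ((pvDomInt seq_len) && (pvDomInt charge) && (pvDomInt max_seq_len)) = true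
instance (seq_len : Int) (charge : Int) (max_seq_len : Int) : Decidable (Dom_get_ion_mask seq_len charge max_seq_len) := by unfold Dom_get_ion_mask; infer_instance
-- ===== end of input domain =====

-- B replaces A's nested append loops by a closed-form per-index predicate over the flat
-- index range (each index decoded by divmod into block and position); objective: alternative.

-- ===== PORT A =====
def get_ion_mask (seq_len : Int) (charge : Int) (max_seq_len : Int) : List Bool :=
  let mask : List Bool := [true]
  let charge := if charge > 3 then (3 : Int) else charge
  (PySem.List.pyRange 1 3 1).foldl (fun mask _ion =>
    (PySem.List.pyRange 1 4 1).foldl (fun mask chr =>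
      if chr > charge then
        (PySem.List.pyRange 1 max_seq_len 1).foldl (fun mask _seq_idx => mask ++ [false]) mask
      else
        (PySem.List.pyRange 1 max_seq_len 1).foldl (fun mask seq_idx =>
          if seq_idx < seq_len then mask ++ [true] else mask ++ [false]) mask) mask) mask

-- ===== PORT B =====
-- Python's divmod(k-1, L) is ported as (floordiv, mod); Python raises only when L = 0,
-- which B never reaches (for L ≤ 0 the range contains only k = 0), so this is exact.
def pvBit (seq_len : Int) (n : Int) (L : Int) (k : Int) : Bool :=
  if k = 0 then true
  else
    let b := PySem.Int.floordiv (k - 1) L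
    let p := PySem.Int.mod (k - 1) L
    decide (PySem.Int.mod b 3 < n) && decide (p + 1 < seq_len)

def get_ion_mask_alt (seq_len : Int) (charge : Int) (max_seq_len : Int) : List Bool :=
  let L := max_seq_len - 1
  let n := min (max charge 0) 3
  (PySem.List.pyRange 0 (1 + 6 * max L 0) 1).map (pvBit seq_len n L)

-- ===== PRECONDITION & SPEC =====
def Spec_get_ion_mask (seq_len : Int) (charge : Int) (max_seq_len : Int) (out : List Bool) : Prop := out = get_ion_mask_alt seq_len charge max_seq_len
instance (seq_len : Int) (charge : Int) (max_seq_len : Int) (out : List Bool) : Decidable (Spec_get_ion_mask seq_len charge max_seq_len out) := by unfold Spec_get_ion_mask; infer_instance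

-- ===== CLAIM (what is proved, stated in full; the proofs are below) =====
def Claim_equal_get_ion_mask : Prop := ∀ (seq_len : Int) (charge : Int) (max_seq_len : Int), Dom_get_ion_mask seq_len charge max_seq_len → Spec_get_ion_mask seq_len charge max_seq_len (get_ion_mask seq_len charge max_seq_len)

-- ===== LEMMAS AND PROOFS =====

-- one ion/charge block, written as a map over the position range with a fixed activity bool
def pvBlk (s m : Int) (c : Bool) : List Bool :=
  (PySem.List.pyRange 1 m 1).map (fun i => c && decide (i < s))

-- A's active inner loop appends the comparison result per iteration.
theorem foldl_app_act (s : Int) (l : List Int) (acc : List Bool) :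
    l.foldl (fun mask seq_idx => if seq_idx < s then mask ++ [true] else mask ++ [false]) acc
      = acc ++ l.map (fun i => decide (i < s)) := by
  induction l generalizing acc with
  | nil => simp
  | cons x xs ih =>
    by_cases h : x < s <;> simp [List.foldl, h, ih]

-- A's inactive inner loop appends false per iteration.
theorem foldl_app_false (l : List Int) (acc : List Bool) :
    l.foldl (fun mask (_ : Int) => mask ++ [false]) acc = acc ++ l.map (fun _ => false) := by
  induction l generalizing acc with
  | nil => simp
  | cons x xs ih => simp [List.foldl, ih]

theorem blk_true (s m : Int) :
    pvBlk s m true = (PySem.List.pyRange 1 m 1).map (fun i => decide (i < s)) := by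
  simp [pvBlk]

theorem blk_false (s m : Int) :
    pvBlk s m false = (PySem.List.pyRange 1 m 1).map (fun (_ : Int) => false) := by
  simp [pvBlk]

-- B's bit on one block of the flat index range is the block map.
theorem bit_block (s n L : Int) (hL : 0 < L) (b : Int) (hb : 0 ≤ b) :
    (PySem.List.pyRange (1 + b * L) (1 + b * L + L) 1).map (pvBit s n L)
      = pvBlk s (L + 1) (decide (PySem.Int.mod b 3 < n)) := by
  have hbL : 0 ≤ b * L := mul_nonneg hb hL.le
  unfold pvBlk
  rw [PySem.List.pyRange_one (1 + b * L) (1 + b * L + L), PySem.List.pyRange_one 1 (L + 1)]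
  have harg : (1 + b * L + L - (1 + b * L)).toNat = (L + 1 - 1).toNat := by omega
  rw [harg, List.map_map, List.map_map]
  apply List.map_congr_left
  intro k hk
  have hkL : (k : Int) < L := by
    have := List.mem_range.mp hk
    omega
  have hk0 : (0 : Int) ≤ (k : Int) := Int.natCast_nonneg k
  have hne : 1 + b * L + (k : Int) ≠ 0 := by omega
  have hdiv : PySem.Int.floordiv (1 + b * L + (k : Int) - 1) L = b := by
    rw [PySem.Int.floordiv_eq_iff_of_pos hL]
    constructor
    · linarith
    · have : (b + 1) * L = b * L + L := by ring
      linarith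
  have hmod : PySem.Int.mod (1 + b * L + (k : Int) - 1) L = (k : Int) := by
    have h := PySem.Int.floordiv_mul_add_mod (1 + b * L + (k : Int) - 1) L
    rw [hdiv] at h
    linarith
  simp only [Function.comp, pvBit, hne, hdiv, hmod, if_false]
  have h1k : (k : Int) + 1 = 1 + (k : Int) := by ring
  simp [h1k]

-- B decomposed into the leading true and six blocks (nondegenerate case m > 1).
theorem alt_decomp (s c m : Int) (hm : 1 < m) :
    get_ion_mask_alt s c m
      = [true] ++ (pvBlk s m (decide (0 < min (max c 0) 3))
          ++ pvBlk s m (decide (1 < min (max c 0) 3))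
          ++ pvBlk s m (decide (2 < min (max c 0) 3)))
        ++ (pvBlk s m (decide (0 < min (max c 0) 3))
          ++ pvBlk s m (decide (1 < min (max c 0) 3))
          ++ pvBlk s m (decide (2 < min (max c 0) 3))) := by
  have hL0 : (0:Int) < m - 1 := by omega
  have hmax : max (m - 1) 0 = m - 1 := by omega
  show (PySem.List.pyRange 0 (1 + 6 * max (m - 1) 0) 1).map (pvBit s (min (max c 0) 3) (m - 1)) = _
  set n := min (max c 0) 3 with hn
  set L := m - 1 with hLdef
  rw [hmax,PySem.List.pyRange_one_append 0 1 (1 + 6 * L) (by omega) (by omega),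
      PySem.List.pyRange_one_append 1 (1 + L) (1 + 6 * L) (by omega) (by omega),
      PySem.List.pyRange_one_append (1 + L) (1 + 2 * L) (1 + 6 * L) (by omega) (by omega),
      PySem.List.pyRange_one_append (1 + 2 * L) (1 + 3 * L) (1 + 6 * L) (by omega) (by omega),
      PySem.List.pyRange_one_append (1 + 3 * L) (1 + 4 * L) (1 + 6 * L) (by omega) (by omega),
      PySem.List.pyRange_one_append (1 + 4 * L) (1 + 5 * L) (1 + 6 * L) (by omega) (by omega)]
  have h0 : PySem.List.pyRange 0 1 1 = [0] := PySem.List.pyRange_one_singleton 0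
  have e0 : PySem.List.pyRange 1 (1 + L) 1 = PySem.List.pyRange (1 + 0 * L) (1 + 0 * L + L) 1 := by norm_num
  have e1 : PySem.List.pyRange (1 + L) (1 + 2 * L) 1 = PySem.List.pyRange (1 + 1 * L) (1 + 1 * L + L) 1 := by ring_nf
  have e2 : PySem.List.pyRange (1 + 2 * L) (1 + 3 * L) 1 = PySem.List.pyRange (1 + 2 * L) (1 + 2 * L + L) 1 := by ring_nf
  have e3 : PySem.List.pyRange (1 + 3 * L) (1 + 4 * L) 1 = PySem.List.pyRange (1 + 3 * L) (1 + 3 * L + L) 1 := by ring_nf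
  have e4 : PySem.List.pyRange (1 + 4 * L) (1 + 5 * L) 1 = PySem.List.pyRange (1 + 4 * L) (1 + 4 * L + L) 1 := by ring_nf
  have e5 : PySem.List.pyRange (1 + 5 * L) (1 + 6 * L) 1 = PySem.List.pyRange (1 + 5 * L) (1 + 5 * L + L) 1 := by ring_nf
  rw [h0, e0, e1, e2, e3, e4, e5]
  simp only [List.map_append, List.map_cons, List.map_nil]
  rw [bit_block s n L hL0 0 (by omega), bit_block s n L hL0 1 (by omega),
      bit_block s n L hL0 2 (by omega), bit_block s n L hL0 3 (by omega),
      bit_block s n L hL0 4 (by omega), bit_block s n L hL0 5 (by omega)]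
  have m0 : PySem.Int.mod 0 3 = 0 := by decide
  have m1 : PySem.Int.mod 1 3 = 1 := by decide
  have m2 : PySem.Int.mod 2 3 = 2 := by decide
  have m3 : PySem.Int.mod 3 3 = 0 := by decide
  have m4 : PySem.Int.mod 4 3 = 1 := by decide
  have m5 : PySem.Int.mod 5 3 = 2 := by decide
  rw [m0, m1, m2, m3, m4, m5]
  have hLm : L + 1 = m := by omega
  rw [hLm]
  simp [pvBit, List.append_assoc]

-- A normalized: leading true, then per (ion, chr) one pvBlk whose activity is chr ≤ clamped charge.
theorem A_norm (s c m : Int) :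
    get_ion_mask s c m
      = [true] ++ (pvBlk s m (!decide ((1:Int) > if c > 3 then (3:Int) else c))
          ++ pvBlk s m (!decide ((2:Int) > if c > 3 then (3:Int) else c))
          ++ pvBlk s m (!decide ((3:Int) > if c > 3 then (3:Int) else c)))
        ++ (pvBlk s m (!decide ((1:Int) > if c > 3 then (3:Int) else c))
          ++ pvBlk s m (!decide ((2:Int) > if c > 3 then (3:Int) else c))
          ++ pvBlk s m (!decide ((3:Int) > if c > 3 then (3:Int) else c))) := by
  have hr3 : PySem.List.pyRange 1 3 1 = [1, 2] := by decide
  have hr4 : PySem.List.pyRange 1 4 1 = [1, 2, 3] := by decide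
  unfold get_ion_mask
  simp only [hr3, hr4, List.foldl_cons, List.foldl_nil]
  by_cases h1 : (1:Int) > (if c > 3 then (3:Int) else c) <;>
  by_cases h2 : (2:Int) > (if c > 3 then (3:Int) else c) <;>
  by_cases h3 : (3:Int) > (if c > 3 then (3:Int) else c) <;>
    simp [h1, h2, h3, foldl_app_false, foldl_app_act, blk_true, blk_false,
          List.append_assoc] <;> try omega

-- the activity booleans of the two normal forms coincide, for every charge
theorem bool_eq1 (c : Int) :
    (!decide ((1:Int) > if c > 3 then (3:Int) else c)) = decide (0 < min (max c 0) 3) := by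
  rw [← decide_not, decide_eq_decide]
  split_ifs <;> omega

theorem bool_eq2 (c : Int) :
    (!decide ((2:Int) > if c > 3 then (3:Int) else c)) = decide (1 < min (max c 0) 3) := by
  rw [← decide_not, decide_eq_decide]
  split_ifs <;> omega

theorem bool_eq3 (c : Int) :
    (!decide ((3:Int) > if c > 3 then (3:Int) else c)) = decide (2 < min (max c 0) 3) := by
  rw [← decide_not, decide_eq_decide]
  split_ifs <;> omega

theorem get_ion_mask_spec : Claim_equal_get_ion_mask := by
  intro s c m _
  unfold Spec_get_ion_mask
  by_cases hm : 1 < m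
  case neg =>
    -- degenerate: no positions, both sides are [true]
    have hr : PySem.List.pyRange 1 m 1 = [] := PySem.List.pyRange_one_eq_nil (by omega)
    have hr3 : PySem.List.pyRange 1 3 1 = [1, 2] := by decide
    have hr4 : PySem.List.pyRange 1 4 1 = [1, 2, 3] := by decide
    have hmax : max (m - 1) 0 = 0 := by omega
    have h01 : PySem.List.pyRange 0 1 1 = [0] := by decide
    unfold get_ion_mask get_ion_mask_alt
    simp [hr, hr3, hr4, hmax, h01, pvBit]
  case pos =>
    rw [alt_decomp s c m hm, A_norm s c m, bool_eq1 c, bool_eq2 c, bool_eq3 c]
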